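-- pv_equiv track=rewrite | github.com/vadimmm/gb_python_homework | 04_221018/task_5.py | degreeReplace
-- ===== SOURCE A (Python) =====
-- degrees = {"0": "\u2070",
--            "1": "\u00B9",
--            "2": "\u00B2",
--            "3": "\u00B3",
--            "4": "\u2074",
--            "5": "\u2075",
--            "6": "\u2076",
--            "7": "\u2077",
--            "8": "\u2078",
--            "9": "\u2079"
--            }
--
-- def degreeReplace(equation):
--     # Преобразует "00x^0" в "00x⁰"
--     value = list(equation.partition('^'))
--     value.pop(1)
--     degree = list(value[1])
--     for i in range(len(degree)):
--         digit = degree[i]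
--         degree[i] = degrees[digit]
--     value[1] = ''.join(degree)
--     res = ''.join(value)
--     return res
-- ===== SOURCE B (Python) =====
-- degrees = {"0": "\u2070",
--            "1": "\u00B9",
--            "2": "\u00B2",
--            "3": "\u00B3",
--            "4": "\u2074",
--            "5": "\u2075",
--            "6": "\u2076",
--            "7": "\u2077",
--            "8": "\u2078",
--            "9": "\u2079"
--            }
--
-- def degreeReplace(equation):
--     # One linear pass with an 'in exponent' flag instead of partitioning first.
--     out = []
--     in_exp = False
--     for ch in equation:
--         if ch == '^' and not in_exp:
--             in_exp = True
--         elif in_exp: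
--             out.append(degrees[ch])
--         else:
--             out.append(ch)
--     return ''.join(out)
-- ===== Notes on version B (the rewrite author's own statement) =====
-- stated objective: alternative
-- what changed: B replaces A's partition-into-(head,sep,tail)-then-index-loop-over-the-tail with a single left-to-right scan carrying an in-exponent flag and one output list.
-- outside the precondition, e.g. on degreeReplace('x^1a'): A raises KeyError, B raises KeyError
import Mathlib
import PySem

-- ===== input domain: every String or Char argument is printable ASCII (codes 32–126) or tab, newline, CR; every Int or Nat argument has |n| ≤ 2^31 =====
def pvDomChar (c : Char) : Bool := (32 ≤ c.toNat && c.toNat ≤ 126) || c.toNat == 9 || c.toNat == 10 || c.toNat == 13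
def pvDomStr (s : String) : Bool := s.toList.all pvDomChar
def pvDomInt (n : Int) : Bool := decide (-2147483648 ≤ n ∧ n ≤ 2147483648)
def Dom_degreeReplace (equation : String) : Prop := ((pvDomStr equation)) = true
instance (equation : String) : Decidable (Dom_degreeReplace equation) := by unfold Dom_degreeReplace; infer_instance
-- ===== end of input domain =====

-- B replaces A's partition-then-loop-over-the-suffix by a single scan with an in-exponent flag
-- (alternative decomposition, same cost); on non-digits after '^' both Pythons raise KeyError (excluded by Pre_).

-- the module-level dict 'degrees'; returns none where Python's degrees[c] raises KeyError
def pvDegrees (c : Char) : Option Char :=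
  if c = '0' then some '⁰' else if c = '1' then some '¹' else if c = '2' then some '²'
  else if c = '3' then some '³' else if c = '4' then some '⁴' else if c = '5' then some '⁵'
  else if c = '6' then some '⁶' else if c = '7' then some '⁷' else if c = '8' then some '⁸'
  else if c = '9' then some '⁹' else none

-- ===== PORT A =====
-- equation.partition('^') with the separator popped: (part before first '^', part after it)
def pvPartA : List Char → List Char × List Char
  | [] => ([], [])
  | c :: rest =>
    if c = '^' then ([], rest)
    else
      let (b, a) := pvPartA rest
      (c :: b, a)

def degreeReplace (equation : String) : String :=
  let value := pvPartA equation.toList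
  -- for i in range(len(degree)): degree[i] = degrees[degree[i]]  (KeyError → outside Pre_, keep c)
  let degree := value.2.map (fun c => (pvDegrees c).getD c)
  String.ofList (value.1 ++ degree)

-- ===== PORT B =====
-- one pass with an in-exponent flag, building the output list
def pvScanB : Bool → List Char → List Char
  | _, [] => []
  | inExp, c :: rest =>
    if c = '^' ∧ inExp = false then pvScanB true rest
    else if inExp then ((pvDegrees c).getD c) :: pvScanB inExp rest
    else c :: pvScanB inExp rest

def degreeReplace_alt (equation : String) : String :=
  String.ofList (pvScanB false equation.toList)

-- ===== PRECONDITION & SPEC =====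
-- Pre_ excludes exactly the inputs on which the Python raises KeyError: a character after the
-- first '^' (including a second '^') that is not a decimal digit.
def Pre_degreeReplace (equation : String) : Prop :=
  ((equation.toList.dropWhile (· ≠ '^')).drop 1).all (fun c => '0' ≤ c && c ≤ '9') = true
instance (equation : String) : Decidable (Pre_degreeReplace equation) := by
  unfold Pre_degreeReplace; infer_instance
def pvWitness_degreeReplace : String := "00x^0"
def Spec_degreeReplace (equation : String) (out : String) : Prop := out = degreeReplace_alt equation
instance (equation : String) (out : String) : Decidable (Spec_degreeReplace equation out) := by unfold Spec_degreeReplace; infer_instance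

-- ===== CLAIM (what is proved, stated in full; the proofs are below) =====
def Claim_equal_degreeReplace : Prop := ∀ (equation : String), Dom_degreeReplace equation → Pre_degreeReplace equation → Spec_degreeReplace equation (degreeReplace equation)

-- ===== LEMMAS AND PROOFS =====
-- with the flag set, B maps the rest through degrees
theorem pvScanB_true (cs : List Char) :
    pvScanB true cs = cs.map (fun c => (pvDegrees c).getD c) := by
  induction cs with
  | nil => rfl
  | cons c rest ih => simp [pvScanB, ih]

-- with the flag clear, B computes A's partition-and-map result
theorem pvScanB_false (cs : List Char) :
    pvScanB false cs =
      (pvPartA cs).1 ++ (pvPartA cs).2.map (fun c => (pvDegrees c).getD c) := by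
  induction cs with
  | nil => rfl
  | cons c rest ih =>
    by_cases h : c = '^'
    · simp [pvScanB, pvPartA, h, pvScanB_true]
    · simp [pvScanB, pvPartA, h, ih]

-- ===== VERDICT (by name: the statement is the Claim_ definition above) =====
theorem degreeReplace_spec : Claim_equal_degreeReplace := by
  intro equation _ _
  unfold Spec_degreeReplace degreeReplace degreeReplace_alt
  rw [pvScanB_false]
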